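-- pv_equiv track=rewrite | github.com/sinoyon/analystx | src/analystx/advanced_analytics.py | _get_quality_recommendations
-- ===== SOURCE A (Python) =====
-- from typing import Dict, List, Tuple, Any
--
-- def _get_quality_recommendations(issues: List[str]) -> List[str]:
--     """Generate recommendations based on quality issues."""
--     recommendations = []
--
--     if any("missing" in issue.lower() for issue in issues):
--         recommendations.append("Impute or remove rows/columns with missing values")
--
--     if any("duplicate" in issue.lower() for issue in issues):
--         recommendations.append("Remove duplicate rows to ensure data uniqueness")
--
--     if any("constant" in issue.lower() for issue in issues):
--         recommendations.append("Remove columns with constant values as they add no information")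
--
--     if any("outlier" in issue.lower() for issue in issues):
--         recommendations.append("Investigate and handle outliers appropriately")
--
--     if not recommendations:
--         recommendations.append("Data quality is good - proceed with analysis")
--
--     return recommendations
-- ===== SOURCE B (Python) =====
-- def _get_quality_recommendations(issues):
--     """Single pass: lowercase each issue once, accumulate four flags, then emit."""
--     miss = dup = const = outl = False
--     for issue in issues:
--         low = issue.lower()
--         miss = miss or "missing" in low
--         dup = dup or "duplicate" in low
--         const = const or "constant" in low
--         outl = outl or "outlier" in low
--     recs = []
--     if miss:
--         recs.append("Impute or remove rows/columns with missing values")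
--     if dup:
--         recs.append("Remove duplicate rows to ensure data uniqueness")
--     if const:
--         recs.append("Remove columns with constant values as they add no information")
--     if outl:
--         recs.append("Investigate and handle outliers appropriately")
--     if not recs:
--         recs.append("Data quality is good - proceed with analysis")
--     return recs
-- ===== Notes on version B (the rewrite author's own statement) =====
-- stated objective: faster
-- what changed: Replaces four independent any() scans (each lowercasing every issue again) with one pass that lowercases each issue once and accumulates four boolean flags, then emits the messages in the fixed order from the flags.
import Mathlib
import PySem

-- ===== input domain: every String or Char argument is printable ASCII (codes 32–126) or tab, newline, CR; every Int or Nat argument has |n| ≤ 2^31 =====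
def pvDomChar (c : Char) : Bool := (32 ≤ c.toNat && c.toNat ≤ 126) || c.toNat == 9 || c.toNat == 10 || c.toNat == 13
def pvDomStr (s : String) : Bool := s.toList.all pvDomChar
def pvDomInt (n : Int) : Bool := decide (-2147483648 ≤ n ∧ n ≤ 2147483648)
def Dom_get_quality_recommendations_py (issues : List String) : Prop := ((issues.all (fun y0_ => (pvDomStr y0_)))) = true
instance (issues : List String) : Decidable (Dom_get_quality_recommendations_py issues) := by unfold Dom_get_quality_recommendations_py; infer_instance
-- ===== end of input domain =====

-- B replaces A's four any() scans (each lowercasing every string again) with one pass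
-- that lowercases each issue once and accumulates four flags (objective: faster, constant factor).

-- ===== PORT A =====
def get_quality_recommendations_py (issues : List String) : List String :=
  let recommendations : List String := []
  let recommendations := if issues.any (fun issue => PySem.Str.isIn "missing" (PySem.Str.lower issue))
    then recommendations ++ ["Impute or remove rows/columns with missing values"] else recommendations
  let recommendations := if issues.any (fun issue => PySem.Str.isIn "duplicate" (PySem.Str.lower issue))
    then recommendations ++ ["Remove duplicate rows to ensure data uniqueness"] else recommendations
  let recommendations := if issues.any (fun issue => PySem.Str.isIn "constant" (PySem.Str.lower issue))
    then recommendations ++ ["Remove columns with constant values as they add no information"] else recommendations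
  let recommendations := if issues.any (fun issue => PySem.Str.isIn "outlier" (PySem.Str.lower issue))
    then recommendations ++ ["Investigate and handle outliers appropriately"] else recommendations
  if recommendations = [] then recommendations ++ ["Data quality is good - proceed with analysis"]
  else recommendations

-- ===== PORT B =====
-- single pass: lowercase once per issue, accumulate four flags
def gqrFlags (issues : List String) : Bool × Bool × Bool × Bool :=
  issues.foldl (fun (f : Bool × Bool × Bool × Bool) issue =>
      let low := PySem.Str.lower issue
      (f.1 || PySem.Str.isIn "missing" low,
       f.2.1 || PySem.Str.isIn "duplicate" low,
       f.2.2.1 || PySem.Str.isIn "constant" low,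
       f.2.2.2 || PySem.Str.isIn "outlier" low))
    (false, false, false, false)

def get_quality_recommendations_py_alt (issues : List String) : List String :=
  let f := gqrFlags issues
  let recs : List String := []
  let recs := if f.1 then recs ++ ["Impute or remove rows/columns with missing values"] else recs
  let recs := if f.2.1 then recs ++ ["Remove duplicate rows to ensure data uniqueness"] else recs
  let recs := if f.2.2.1 then recs ++ ["Remove columns with constant values as they add no information"] else recs
  let recs := if f.2.2.2 then recs ++ ["Investigate and handle outliers appropriately"] else recs
  if recs = [] then recs ++ ["Data quality is good - proceed with analysis"] else recs

-- ===== PRECONDITION & SPEC =====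
def Spec_get_quality_recommendations_py (issues : List String) (out : List String) : Prop := out = get_quality_recommendations_py_alt issues
instance (issues : List String) (out : List String) : Decidable (Spec_get_quality_recommendations_py issues out) := by unfold Spec_get_quality_recommendations_py; infer_instance

-- ===== CLAIM (what is proved, stated in full; the proofs are below) =====
def Claim_equal_get_quality_recommendations_py : Prop := ∀ (issues : List String), Dom_get_quality_recommendations_py issues → Spec_get_quality_recommendations_py issues (get_quality_recommendations_py issues)

-- ===== LEMMAS AND PROOFS =====
theorem gqrFlags_go (issues : List String) (a b c d : Bool) :
    issues.foldl (fun (f : Bool × Bool × Bool × Bool) issue =>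
      let low := PySem.Str.lower issue
      (f.1 || PySem.Str.isIn "missing" low,
       f.2.1 || PySem.Str.isIn "duplicate" low,
       f.2.2.1 || PySem.Str.isIn "constant" low,
       f.2.2.2 || PySem.Str.isIn "outlier" low)) (a, b, c, d)
    = (a || issues.any (fun i => PySem.Str.isIn "missing" (PySem.Str.lower i)),
       b || issues.any (fun i => PySem.Str.isIn "duplicate" (PySem.Str.lower i)),
       c || issues.any (fun i => PySem.Str.isIn "constant" (PySem.Str.lower i)),
       d || issues.any (fun i => PySem.Str.isIn "outlier" (PySem.Str.lower i))) := by
  induction issues generalizing a b c d with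
  | nil => simp
  | cons x xs ih =>
      rw [List.foldl_cons]
      dsimp only
      rw [ih]
      simp [Bool.or_assoc]

theorem gqrFlags_eq (issues : List String) :
    gqrFlags issues
    = (issues.any (fun i => PySem.Str.isIn "missing" (PySem.Str.lower i)),
       issues.any (fun i => PySem.Str.isIn "duplicate" (PySem.Str.lower i)),
       issues.any (fun i => PySem.Str.isIn "constant" (PySem.Str.lower i)),
       issues.any (fun i => PySem.Str.isIn "outlier" (PySem.Str.lower i))) := by
  unfold gqrFlags
  rw [gqrFlags_go]
  simp

-- ===== VERDICT (by name: the statement is the Claim_ definition above) =====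
theorem get_quality_recommendations_py_spec : Claim_equal_get_quality_recommendations_py := by
  intro issues _
  unfold Spec_get_quality_recommendations_py get_quality_recommendations_py get_quality_recommendations_py_alt
  rw [gqrFlags_eq]
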